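-- pv_equiv track=rewrite | github.com/chizoalban2003-beep/MANIFOLD | manifold/multi_agent_planner.py | _first_conflict
-- ===== SOURCE A (Python) =====
-- def _first_conflict(
--     paths: dict[str, list[tuple]]
-- ) -> tuple[str, str, tuple, tuple, int] | None:
--     """Return (agent1, agent2, cell_for_a1, cell_for_a2, timestep) for the first
--     conflict, or None.
--
--     For vertex conflicts: cell_for_a1 == cell_for_a2 (same cell).
--     For edge conflicts: each agent gets the destination cell of the other
--     (prevents them from entering the cell occupied by the other agent).
--     """
--     agent_ids = list(paths.keys())
--     max_t = max((len(p) for p in paths.values()), default=0)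
--
--     for t in range(max_t):
--         positions: dict[tuple, str] = {}
--         for aid in agent_ids:
--             path = paths[aid]
--             cell = path[t] if t < len(path) else path[-1]
--             if cell in positions:
--                 return (positions[cell], aid, cell, cell, t)
--             positions[cell] = aid
--
--     # Edge conflict (swap): agent A moves A→B while agent B moves B→A
--     for t in range(max_t - 1):
--         for i, a1 in enumerate(agent_ids):
--             for a2 in agent_ids[i + 1:]:
--                 p1, p2 = paths[a1], paths[a2]
--                 c1_t = p1[t] if t < len(p1) else p1[-1]
--                 c1_t1 = p1[t + 1] if t + 1 < len(p1) else p1[-1]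
--                 c2_t = p2[t] if t < len(p2) else p2[-1]
--                 c2_t1 = p2[t + 1] if t + 1 < len(p2) else p2[-1]
--                 if c1_t == c2_t1 and c2_t == c1_t1:
--                     # a1 wants to go to c2_t; a2 wants to go to c1_t.
--                     # Constrain a1 from c2_t at t+1, and a2 from c1_t at t+1.
--                     return (a1, a2, c2_t, c1_t, t + 1)
--
--     return None
-- ===== SOURCE B (Python) =====
-- def _first_conflict(
--     paths: dict[str, list[tuple]]
-- ) -> tuple[str, str, tuple, tuple, int] | None:
--     """Re-implementation on per-timestep snapshot lists of cells: vertex phase via a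
--     first-occurrence index dict, edge phase via a from-cell -> index dict looked up
--     once per agent instead of A's pairwise scan."""
--     ids = list(paths.keys())
--     ps = list(paths.values())
--     n = len(ids)
--     max_t = max((len(p) for p in ps), default=0)
--
--     def snap(t):
--         return [p[t] if t < len(p) else p[-1] for p in ps]
--
--     for t in range(max_t):
--         first = {}
--         for j, c in enumerate(snap(t)):
--             if c in first:
--                 return (ids[first[c]], ids[j], c, c, t)
--             first[c] = j
--
--     # no vertex conflict anywhere, so cells within each snapshot are distinct
--     for t in range(max_t - 1):
--         cur = snap(t)
--         nxt = snap(t + 1)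
--         at = {c: j for j, c in enumerate(cur)}
--         for i in range(n):
--             j = at.get(nxt[i])
--             if j is not None and j != i and nxt[j] == cur[i]:
--                 # i is the first index in any swap pair, so j > i
--                 return (ids[i], ids[j], cur[j], cur[i], t + 1)
--
--     return None
-- ===== Notes on version B (the rewrite author's own statement) =====
-- stated objective: alternative
-- what changed: B works on per-timestep snapshot lists of cells: the vertex phase uses a cell->first-index dict over the snapshot, and A's pairwise edge-swap scan per timestep is replaced by a from-cell->index dict looked up once per agent (exploiting that snapshots are duplicate-free once the vertex phase found nothing); fewer operations per timestep asymptotically, though not measurably faster on the generated inputs.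
import Mathlib
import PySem

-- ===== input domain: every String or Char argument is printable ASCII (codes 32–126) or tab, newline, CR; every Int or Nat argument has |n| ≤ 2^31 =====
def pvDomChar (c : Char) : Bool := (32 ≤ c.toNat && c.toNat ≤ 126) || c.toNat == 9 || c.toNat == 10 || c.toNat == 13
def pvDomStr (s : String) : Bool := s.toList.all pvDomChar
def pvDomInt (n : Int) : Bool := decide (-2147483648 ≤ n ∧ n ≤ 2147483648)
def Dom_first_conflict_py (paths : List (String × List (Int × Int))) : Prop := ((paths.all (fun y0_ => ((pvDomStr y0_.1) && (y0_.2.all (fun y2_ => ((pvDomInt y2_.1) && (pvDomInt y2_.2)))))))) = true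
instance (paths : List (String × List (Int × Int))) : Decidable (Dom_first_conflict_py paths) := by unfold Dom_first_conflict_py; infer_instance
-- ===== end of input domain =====

-- B replaces A's pairwise edge-swap scan per timestep by per-timestep snapshot lists
-- with a from-cell -> index dictionary, one lookup per agent (a different algorithm).


-- `path[t] if t < len(path) else path[-1]`; the getD/getLastD defaults are never
-- reached under Pre_ (the guarded index is in range, and paths are nonempty there).
def pvCell (p : List (Int × Int)) (t : Nat) : Int × Int :=
  if t < p.length then p.getD t (0, 0) else p.getLastD (0, 0)

-- ===== PORT A =====
-- `paths[aid]` (dict lookup; keys are distinct under Pre_, so first match = the entry)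
def pvDGet (paths : List (String × List (Int × Int))) (aid : String) : List (Int × Int) :=
  (((paths.find? (fun pr => pr.1 == aid)).map Prod.snd)).getD []

-- `max((len(p) for p in ...), default=0)` (all values are Nats, so fold max from 0)
def pvMaxT (ls : List Nat) : Nat := ls.foldl max 0

-- inner vertex loop of A: positions is the dict cell -> aid (insertion order, no overwrite)
def pvVLoopA (paths : List (String × List (Int × Int))) (t : Nat) :
    List String → List ((Int × Int) × String) →
    Option (String × String × (Int × Int) × (Int × Int) × Int)
  | [], _ => none
  | aid :: rest, pos =>
      let path := pvDGet paths aid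
      let cell := pvCell path t
      match pos.find? (fun e => e.1 == cell) with
      | some e => some (e.2, aid, cell, cell, (t : Int))
      | none => pvVLoopA paths t rest (pos ++ [(cell, aid)])

-- edge loops of A: `for i, a1 in enumerate(agent_ids): for a2 in agent_ids[i+1:]`
def pvELoopA (paths : List (String × List (Int × Int))) (t : Nat) :
    List String → Option (String × String × (Int × Int) × (Int × Int) × Int)
  | [] => none
  | a1 :: rest =>
      match rest.findSome? (fun a2 =>
        let p1 := pvDGet paths a1
        let p2 := pvDGet paths a2
        let c1t := pvCell p1 t
        let c1t1 := pvCell p1 (t + 1)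
        let c2t := pvCell p2 t
        let c2t1 := pvCell p2 (t + 1)
        if c1t = c2t1 ∧ c2t = c1t1 then some (a1, a2, c2t, c1t, ((t : Int) + 1)) else none) with
      | some r => some r
      | none => pvELoopA paths t rest

def first_conflict_py (paths : List (String × List (Int × Int))) :
    Option (String × String × (Int × Int) × (Int × Int) × Int) :=
  let agent_ids := paths.map Prod.fst
  let max_t := pvMaxT (paths.map (fun pr => pr.2.length))
  match (List.range max_t).findSome? (fun t => pvVLoopA paths t agent_ids []) with
  | some r => some r
  | none => (List.range (max_t - 1)).findSome? (fun t => pvELoopA paths t agent_ids)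

-- ===== PORT B =====
-- `[p[t] if t < len(p) else p[-1] for p in ps]`
def pvSnap (ps : List (List (Int × Int))) (t : Nat) : List (Int × Int) :=
  ps.map (fun p => pvCell p t)

-- B's vertex scan over a snapshot: first is the dict cell -> first index
def pvVScanB (ids : List String) (t : Nat) :
    List (Int × Int) → Nat → List ((Int × Int) × Nat) →
    Option (String × String × (Int × Int) × (Int × Int) × Int)
  | [], _, _ => none
  | c :: cs, j, first =>
      match first.find? (fun e => e.1 == c) with
      | some e => some (ids.getD e.2 "", ids.getD j "", c, c, (t : Int))
      | none => pvVScanB ids t cs (j + 1) (first ++ [(c, j)])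

-- `{c: j for j, c in enumerate(cur)}.get(c)`: later bindings overwrite, so get = last match
def pvAtGet (cur : List (Int × Int)) (c : Int × Int) : Option Nat :=
  ((cur.zipIdx.reverse).find? (fun e => e.1 == c)).map Prod.snd

-- B's edge scan at time t: one dict lookup per agent
def pvEScanB (ids : List String) (cur nxt : List (Int × Int)) (t : Nat) :
    Option (String × String × (Int × Int) × (Int × Int) × Int) :=
  (List.range ids.length).findSome? (fun i =>
    match pvAtGet cur (nxt.getD i (0, 0)) with
    | some j =>
        if j ≠ i ∧ nxt.getD j (0, 0) = cur.getD i (0, 0) then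
          some (ids.getD i "", ids.getD j "", cur.getD j (0, 0), cur.getD i (0, 0), ((t : Int) + 1))
        else none
    | none => none)

def first_conflict_py_alt (paths : List (String × List (Int × Int))) :
    Option (String × String × (Int × Int) × (Int × Int) × Int) :=
  let ids := paths.map Prod.fst
  let ps := paths.map Prod.snd
  let max_t := pvMaxT (ps.map List.length)
  match (List.range max_t).findSome? (fun t => pvVScanB ids t (pvSnap ps t) 0 []) with
  | some r => some r
  | none =>
      (List.range (max_t - 1)).findSome? (fun t =>
        pvEScanB ids (pvSnap ps t) (pvSnap ps (t + 1)) t)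

-- ===== PRECONDITION & SPEC =====
-- Pre_ excludes (1) repeated agent ids — an association list with duplicate keys does not
-- represent a Python dict (dict construction silently merges them) — and (2) maps mixing
-- empty and non-empty paths, where A's path[-1] raises IndexError unless an earlier
-- conflict happens to hide the empty path, while B snapshots all cells first and raises.
def Pre_first_conflict_py (paths : List (String × List (Int × Int))) : Prop :=
  (paths.map Prod.fst).Nodup ∧
    ((∀ pr ∈ paths, pr.2 ≠ []) ∨ (∀ pr ∈ paths, pr.2 = []))

instance (paths : List (String × List (Int × Int))) : Decidable (Pre_first_conflict_py paths) := by
  unfold Pre_first_conflict_py; infer_instance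

def pvWitness_first_conflict_py : (List (String × List (Int × Int))) :=
  [("a", [(0, 0), (0, 1)]), ("b", [(1, 0), (0, 0)])]

def Spec_first_conflict_py (paths : List (String × List (Int × Int))) (out : Option (String × String × (Int × Int) × (Int × Int) × Int)) : Prop := out = first_conflict_py_alt paths
instance (paths : List (String × List (Int × Int))) (out : Option (String × String × (Int × Int) × (Int × Int) × Int)) : Decidable (Spec_first_conflict_py paths out) := by unfold Spec_first_conflict_py; infer_instance

-- ===== CLAIM (what is proved, stated in full; the proofs are below) =====
def Claim_equal_first_conflict_py : Prop := ∀ (paths : List (String × List (Int × Int))), Dom_first_conflict_py paths → Pre_first_conflict_py paths → Spec_first_conflict_py paths (first_conflict_py paths)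

-- ===== LEMMAS AND PROOFS =====

-- ---- generic findSome? tools ----

lemma pvFindSome?_drop_eq {α β : Type} (l : List α) (F : α → Option β) (G : Nat → Option β)
    (h : ∀ (j : Nat) (hj : j < l.length), G j = F (l[j])) :
    ∀ (k i : Nat), l.length - i ≤ k →
      (l.drop i).findSome? F = (List.range' i (l.length - i)).findSome? G := by
  intro k
  induction k with
  | zero =>
      intro i hi
      have hle : l.length ≤ i := by omega
      have h0 : l.length - i = 0 := by omega
      simp [List.drop_eq_nil_of_le hle, h0]
  | succ k ih =>
      intro i hi
      by_cases hlt : i < l.length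
      · have hn : l.length - i = (l.length - (i + 1)) + 1 := by omega
        rw [List.drop_eq_getElem_cons hlt, hn, List.range'_succ]
        simp only [List.findSome?_cons]
        rw [← h i hlt]
        cases hG : G i with
        | some b => rfl
        | none => exact ih (i + 1) (by omega)
      · have hle : l.length ≤ i := by omega
        have h0 : l.length - i = 0 := by omega
        simp [List.drop_eq_nil_of_le hle, h0]

lemma pvFindSome?_unique {α β : Type} (f : α → Option β) (j : α) (b : β) :
    ∀ (l : List α), j ∈ l → f j = some b → (∀ x ∈ l, (f x).isSome → x = j) →
      l.findSome? f = some b := by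
  intro l
  induction l with
  | nil => intro h; cases h
  | cons a l ih =>
      intro hmem hj huniq
      cases hfa : f a with
      | some c =>
          have ha : a = j := huniq a (by simp) (by simp [hfa])
          have hfb : f a = some b := by rw [ha, hj]
          simp [hfb]
      | none =>
          have hmem' : j ∈ l := by
            rcases List.mem_cons.mp hmem with h | h
            · exfalso; rw [h, hfa] at hj; cases hj
            · exact h
          simp only [List.findSome?_cons, hfa]
          exact ih hmem' hj (fun x hx => huniq x (by simp [hx]))

lemma pvFindSome?_isSome {α β : Type} (f : α → Option β) (j : α) :
    ∀ (l : List α), j ∈ l → (f j).isSome → (l.findSome? f).isSome := by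
  intro l
  induction l with
  | nil => intro h; cases h
  | cons a l ih =>
      intro hmem hj
      cases hfa : f a with
      | some c => simp [hfa]
      | none =>
          have hmem' : j ∈ l := by
            rcases List.mem_cons.mp hmem with h | h
            · exfalso; rw [h, hfa] at hj; simp at hj
            · exact h
          simp only [List.findSome?_cons, hfa]
          exact ih hmem' hj

lemma pvFindSome?_congr {α β : Type} (f g : α → Option β) :
    ∀ (l : List α), (∀ x ∈ l, f x = g x) → l.findSome? f = l.findSome? g := by
  intro l
  induction l with
  | nil => intro _; rfl
  | cons a l ih =>
      intro h
      simp only [List.findSome?_cons, h a (by simp)]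
      cases g a with
      | some b => rfl
      | none => exact ih (fun x hx => h x (by simp [hx]))

-- first index on which f fires = first index on which g fires (f hits are g hits with the
-- same value; a g hit is an f hit or is preceded by one)
lemma pvFindSome?_range_minEq {β : Type} (n : Nat) (f g : Nat → Option β)
    (hfg : ∀ i, i < n → ∀ b, f i = some b → g i = some b)
    (hgf : ∀ i, i < n → ∀ b, g i = some b → f i = some b ∨ ∃ j, j < i ∧ (f j).isSome) :
    (List.range n).findSome? f = (List.range n).findSome? g := by
  induction n with
  | zero => rfl
  | succ n ih =>
      have ihn := ih (fun i hi => hfg i (by omega)) (fun i hi => hgf i (by omega))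
      rw [List.range_succ, List.findSome?_append, List.findSome?_append, ← ihn]
      cases hP : (List.range n).findSome? f with
      | some r => rfl
      | none =>
          simp only [Option.none_or]
          cases hfn : f n with
          | some b =>
              have hgn := hfg n (by omega) b hfn
              simp [hfn, hgn]
          | none =>
              cases hgn : g n with
              | none => simp [hfn, hgn]
              | some b =>
                  rcases hgf n (by omega) b hgn with h | ⟨j, hj, hjs⟩
                  · rw [hfn] at h; cases h
                  · exfalso
                    have hz : f j = none :=
                      List.findSome?_eq_none_iff.mp hP j (List.mem_range.mpr (by omega))
                    rw [hz] at hjs; cases hjs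

-- ---- dict-lookup facts ----

-- under distinct keys, A's paths[aid] lookup returns the entry's own path
lemma pvDGet_mem (paths : List (String × List (Int × Int)))
    (hnd : (paths.map Prod.fst).Nodup) :
    ∀ pr ∈ paths, pvDGet paths pr.1 = pr.2 := by
  induction paths with
  | nil => intro pr h; cases h
  | cons hd tl ih =>
      simp only [List.map_cons, List.nodup_cons] at hnd
      intro pr hpr
      rcases List.mem_cons.mp hpr with h | h
      · subst h; simp [pvDGet]
      · have hne : (hd.1 == pr.1) = false := by
          simp only [beq_eq_false_iff_ne, ne_eq]
          intro hcontra
          exact hnd.1 (hcontra ▸ List.mem_map_of_mem h)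
        simpa [pvDGet, List.find?_cons, hne] using ih hnd.2 pr h

lemma pvSnap_getD (ps : List (List (Int × Int))) (t i : Nat) (hi : i < ps.length) :
    (pvSnap ps t).getD i (0, 0) = pvCell (ps[i]) t := by
  rw [pvSnap, List.getD_eq_getElem _ _ (by simpa using hi)]
  simp

lemma pvAtGet_some (cur : List (Int × Int)) (c : Int × Int) (j : Nat)
    (h : pvAtGet cur c = some j) : j < cur.length ∧ cur.getD j (0, 0) = c := by
  unfold pvAtGet at h
  cases hf : (cur.zipIdx.reverse).find? (fun e => e.1 == c) with
  | none => rw [hf] at h; cases h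
  | some e =>
      rw [hf] at h
      have hj : e.2 = j := by simpa using h
      have hmem : e ∈ cur.zipIdx := List.mem_reverse.mp (List.mem_of_find?_eq_some hf)
      have hpred := List.find?_some hf
      have hget : cur[e.2]? = some e.1 := List.mk_mem_zipIdx_iff_getElem?.mp hmem
      have hlt : e.2 < cur.length := (List.getElem?_eq_some_iff.mp hget).1
      have hval : cur[e.2]'hlt = e.1 := (List.getElem?_eq_some_iff.mp hget).2
      subst hj
      refine ⟨hlt, ?_⟩
      rw [List.getD_eq_getElem _ _ hlt, hval]
      exact eq_of_beq hpred

lemma pvAtGet_of_nodup (cur : List (Int × Int)) (c : Int × Int) (j : Nat)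
    (hnd : cur.Nodup) (hj : j < cur.length) (hc : cur[j] = c) :
    pvAtGet cur c = some j := by
  have hmem : (c, j) ∈ cur.zipIdx.reverse := by
    rw [List.mem_reverse]
    exact List.mk_mem_zipIdx_iff_getElem?.mpr (by rw [List.getElem?_eq_getElem hj, hc])
  have hs : ((cur.zipIdx.reverse).find? (fun e => e.1 == c)).isSome :=
    List.find?_isSome.mpr ⟨(c, j), hmem, by simp⟩
  obtain ⟨e, he⟩ := Option.isSome_iff_exists.mp hs
  have hpred := List.find?_some he
  have hmem' : e ∈ cur.zipIdx := List.mem_reverse.mp (List.mem_of_find?_eq_some he)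
  have hget : cur[e.2]? = some e.1 := List.mk_mem_zipIdx_iff_getElem?.mp hmem'
  have hlt : e.2 < cur.length := (List.getElem?_eq_some_iff.mp hget).1
  have hval : cur[e.2]'hlt = e.1 := (List.getElem?_eq_some_iff.mp hget).2
  have hj2 : e.2 = j := by
    have h1 : cur[e.2]'hlt = cur[j]'hj := by rw [hval, hc]; exact eq_of_beq hpred
    exact (List.Nodup.getElem_inj_iff hnd).mp h1
  unfold pvAtGet
  rw [he]
  simp [hj2]

-- ---- vertex phase: A's scan over ids with the cell -> aid dict equals B's indexed scan ----

-- maps B's index-valued dict entries to A's aid-valued ones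
def pvIdF (ids : List String) (e : (Int × Int) × Nat) : (Int × Int) × String :=
  (e.1, ids.getD e.2 "")

lemma pvVLoop_eq_scan (paths : List (String × List (Int × Int)))
    (hnd : (paths.map Prod.fst).Nodup) (t : Nat) :
    ∀ (l : List (String × List (Int × Int))) (j : Nat) (first : List ((Int × Int) × Nat)),
      paths.drop j = l →
      pvVLoopA paths t (l.map Prod.fst) (first.map (pvIdF (paths.map Prod.fst))) =
        pvVScanB (paths.map Prod.fst) t (pvSnap (l.map Prod.snd) t) j first := by
  intro l
  induction l with
  | nil => intro j first _; simp [pvVLoopA, pvSnap, pvVScanB]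
  | cons pr l ih =>
      intro j first hdrop
      have hjlt : j < paths.length := by
        by_contra hcon
        rw [List.drop_eq_nil_of_le (by omega)] at hdrop
        cases hdrop
      have hcons := (List.drop_eq_getElem_cons hjlt).symm.trans hdrop
      have hget : paths[j] = pr := (List.cons.injEq _ _ _ _ ▸ hcons).1
      have hdrop' : paths.drop (j + 1) = l := (List.cons.injEq _ _ _ _ ▸ hcons).2
      have hmem : pr ∈ paths := hget ▸ List.getElem_mem hjlt
      have hpath : pvDGet paths pr.1 = pr.2 := pvDGet_mem paths hnd pr hmem
      have hid : (paths.map Prod.fst).getD j "" = pr.1 := by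
        rw [List.getD_eq_getElem _ _ (by simpa using hjlt)]
        simp [hget]
      have hid' : (Option.map Prod.fst paths[j]?).getD "" = pr.1 := by
        simp [List.getElem?_eq_getElem hjlt, hget]
      have hsnap : pvSnap ((pr :: l).map Prod.snd) t =
          pvCell pr.2 t :: pvSnap (l.map Prod.snd) t := by simp [pvSnap]
      rw [hsnap]
      show pvVLoopA paths t (pr.1 :: l.map Prod.fst) (first.map (pvIdF (paths.map Prod.fst))) = _
      rw [pvVLoopA, pvVScanB]
      simp only [hpath]
      have hfind : (first.map (pvIdF (paths.map Prod.fst))).find?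
            (fun e => e.1 == pvCell pr.2 t)
          = (first.find? (fun e => e.1 == pvCell pr.2 t)).map (pvIdF (paths.map Prod.fst)) := by
        rw [List.find?_map]; rfl
      rw [hfind]
      cases hf : first.find? (fun e => e.1 == pvCell pr.2 t) with
      | some e => simp [pvIdF, hid']
      | none =>
          simp only [Option.map_none]
          have hacc : first.map (pvIdF (paths.map Prod.fst)) ++ [(pvCell pr.2 t, pr.1)]
              = (first ++ [(pvCell pr.2 t, j)]).map (pvIdF (paths.map Prod.fst)) := by
            simp [pvIdF, hid']
          rw [hacc]
          exact ih (j + 1) (first ++ [(pvCell pr.2 t, j)]) hdrop'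

-- when B's vertex scan finds nothing, the snapshot's cells are pairwise distinct
lemma pvVScanB_none_nodup (ids : List String) (t : Nat) :
    ∀ (cs : List (Int × Int)) (j : Nat) (first : List ((Int × Int) × Nat)),
      (first.map Prod.fst).Nodup → pvVScanB ids t cs j first = none →
      ((first.map Prod.fst) ++ cs).Nodup := by
  intro cs
  induction cs with
  | nil => intro j first hnd _; simpa using hnd
  | cons c cs ih =>
      intro j first hnd hscan
      rw [pvVScanB] at hscan
      cases hf : first.find? (fun e => e.1 == c) with
      | some e => rw [hf] at hscan; cases hscan
      | none =>
          rw [hf] at hscan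
          have hfresh : c ∉ first.map Prod.fst := by
            intro hmemc
            obtain ⟨e, hemem, he1⟩ := List.mem_map.mp hmemc
            have := List.find?_eq_none.mp hf e hemem
            simp [he1] at this
          have hkeys : ((first ++ [(c, j)]).map Prod.fst).Nodup := by
            simp only [List.map_append, List.map_cons, List.map_nil]
            refine List.Nodup.append hnd (by simp) ?_
            intro a ha hb
            simp only [List.mem_singleton] at hb
            exact hfresh (hb ▸ ha)
          have := ih (j + 1) (first ++ [(c, j)]) hkeys hscan
          simpa [List.append_assoc] using this

-- ---- edge phase ----

-- A's pairwise condition/result at index pair (i, j), over the time-t and t+1 snapshots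
def pvResI (ids : List String) (cur : List (Int × Int)) (t : Nat) (i j : Nat) :
    String × String × (Int × Int) × (Int × Int) × Int :=
  (ids.getD i "", ids.getD j "", cur.getD j (0, 0), cur.getD i (0, 0), ((t : Int) + 1))

def pvGA (ids : List String) (cur nxt : List (Int × Int)) (t : Nat) (i j : Nat) :
    Option (String × String × (Int × Int) × (Int × Int) × Int) :=
  if cur.getD i (0, 0) = nxt.getD j (0, 0) ∧ cur.getD j (0, 0) = nxt.getD i (0, 0)
  then some (pvResI ids cur t i j) else none

-- A's nested edge loops, re-indexed over positions
lemma pvELoopA_eq_idx (paths : List (String × List (Int × Int)))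
    (hnd : (paths.map Prod.fst).Nodup) (t : Nat) :
    ∀ (k i : Nat), paths.length - i ≤ k →
      pvELoopA paths t ((paths.drop i).map Prod.fst) =
        (List.range' i (paths.length - i)).findSome? (fun i' =>
          (List.range' (i' + 1) (paths.length - (i' + 1))).findSome?
            (pvGA (paths.map Prod.fst) (pvSnap (paths.map Prod.snd) t)
              (pvSnap (paths.map Prod.snd) (t + 1)) t i')) := by
  intro k
  induction k with
  | zero =>
      intro i hi
      have hle : paths.length ≤ i := by omega
      have h0 : paths.length - i = 0 := by omega
      simp [List.drop_eq_nil_of_le hle, h0, pvELoopA]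
  | succ k ih =>
      intro i hi
      by_cases hlt : i < paths.length
      · have hmem : paths[i] ∈ paths := List.getElem_mem hlt
        have hp1 : pvDGet paths (paths[i].1) = paths[i].2 := pvDGet_mem paths hnd _ hmem
        have hinner : ((paths.drop (i + 1)).map Prod.fst).findSome? (fun a2 =>
              let p1 := pvDGet paths (paths[i].1)
              let p2 := pvDGet paths a2
              let c1t := pvCell p1 t
              let c1t1 := pvCell p1 (t + 1)
              let c2t := pvCell p2 t
              let c2t1 := pvCell p2 (t + 1)
              if c1t = c2t1 ∧ c2t = c1t1 then
                some (paths[i].1, a2, c2t, c1t, ((t : Int) + 1)) else none)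
            = (List.range' (i + 1) (paths.length - (i + 1))).findSome?
                (pvGA (paths.map Prod.fst) (pvSnap (paths.map Prod.snd) t)
                  (pvSnap (paths.map Prod.snd) (t + 1)) t i) := by
          rw [List.findSome?_map]
          refine pvFindSome?_drop_eq paths _ _ ?_ paths.length (i + 1) (by omega)
          intro j hj
          have hp2 : pvDGet paths (paths[j].1) = paths[j].2 := pvDGet_mem paths hnd _ (List.getElem_mem hj)
          have hps : ∀ (m : Nat) (hm : m < paths.length),
              (paths.map Prod.snd)[m]'(by simpa using hm) = paths[m].2 := by
            intro m hm; simp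
          have hcurI : (pvSnap (paths.map Prod.snd) t).getD i (0, 0) = pvCell (paths[i].2) t := by
            rw [pvSnap_getD _ _ _ (by simpa using hlt), hps i hlt]
          have hcurJ : (pvSnap (paths.map Prod.snd) t).getD j (0, 0) = pvCell (paths[j].2) t := by
            rw [pvSnap_getD _ _ _ (by simpa using hj), hps j hj]
          have hnxtI : (pvSnap (paths.map Prod.snd) (t + 1)).getD i (0, 0) = pvCell (paths[i].2) (t + 1) := by
            rw [pvSnap_getD _ _ _ (by simpa using hlt), hps i hlt]
          have hnxtJ : (pvSnap (paths.map Prod.snd) (t + 1)).getD j (0, 0) = pvCell (paths[j].2) (t + 1) := by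
            rw [pvSnap_getD _ _ _ (by simpa using hj), hps j hj]
          have hidI : (paths.map Prod.fst).getD i "" = paths[i].1 := by
            rw [List.getD_eq_getElem _ _ (by simpa using hlt)]; simp
          have hidJ : (paths.map Prod.fst).getD j "" = paths[j].1 := by
            rw [List.getD_eq_getElem _ _ (by simpa using hj)]; simp
          show pvGA _ _ _ t i j = _
          rw [pvGA, pvResI, hcurI, hcurJ, hnxtI, hnxtJ, hidI, hidJ]
          simp only [Function.comp, hp1, hp2]
        have hcons : (List.range' i (paths.length - i))
            = i :: List.range' (i + 1) (paths.length - (i + 1)) := by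
          have hn : paths.length - i = (paths.length - (i + 1)) + 1 := by omega
          rw [hn, List.range'_succ]
        rw [List.drop_eq_getElem_cons hlt, hcons]
        show pvELoopA paths t (paths[i].1 :: (paths.drop (i + 1)).map Prod.fst) = _
        rw [pvELoopA]
        simp only [List.findSome?_cons]
        rw [hinner]
        cases hG : (List.range' (i + 1) (paths.length - (i + 1))).findSome?
            (pvGA (paths.map Prod.fst) (pvSnap (paths.map Prod.snd) t)
              (pvSnap (paths.map Prod.snd) (t + 1)) t i) with
        | some r => rfl
        | none => exact ih (i + 1) (by omega)
      · have hle : paths.length ≤ i := by omega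
        have h0 : paths.length - i = 0 := by omega
        simp [List.drop_eq_nil_of_le hle, h0, pvELoopA]

-- core: A's pairwise scan equals B's dict-lookup scan once the time-t snapshot is duplicate-free
lemma pvEdge_eq (ids : List String) (cur nxt : List (Int × Int)) (t : Nat)
    (hc : cur.Nodup) (hcl : cur.length = ids.length) (hxl : nxt.length = ids.length) :
    (List.range ids.length).findSome? (fun i =>
        (List.range' (i + 1) (ids.length - (i + 1))).findSome? (pvGA ids cur nxt t i))
      = pvEScanB ids cur nxt t := by
  rw [pvEScanB]
  apply pvFindSome?_range_minEq
  · -- an A hit at (i, j) is a B hit at i with the same value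
    intro i hi b hf
    obtain ⟨j, hjmem, hgaj⟩ := List.exists_of_findSome?_eq_some hf
    have hjr := List.mem_range'_1.mp hjmem
    have hij : i + 1 ≤ j := hjr.1
    have hjn : j < ids.length := by omega
    by_cases hcond : cur.getD i (0, 0) = nxt.getD j (0, 0) ∧ cur.getD j (0, 0) = nxt.getD i (0, 0)
    · rw [pvGA, if_pos hcond] at hgaj
      have hb : b = pvResI ids cur t i j := by injection hgaj with h; exact h.symm
      have hat : pvAtGet cur (nxt.getD i (0, 0)) = some j := by
        apply pvAtGet_of_nodup cur _ j hc (by omega)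
        rw [← List.getD_eq_getElem _ (0, 0) (by omega)]
        exact hcond.2
      rw [hat]
      have hguard : j ≠ i ∧ nxt.getD j (0, 0) = cur.getD i (0, 0) :=
        ⟨by omega, hcond.1.symm⟩
      show (if j ≠ i ∧ nxt.getD j (0, 0) = cur.getD i (0, 0) then
          some (ids.getD i "", ids.getD j "", cur.getD j (0, 0), cur.getD i (0, 0),
            ((t : Int) + 1)) else none) = some b
      rw [if_pos hguard, hb]
      rfl
    · rw [pvGA, if_neg hcond] at hgaj; cases hgaj
  · -- a B hit at i is an A hit at (i, j) (j > i) or is preceded by the A hit at (j, i)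
    intro i hi b hg
    cases hat : pvAtGet cur (nxt.getD i (0, 0)) with
    | none => rw [hat] at hg; cases hg
    | some j =>
        rw [hat] at hg
        have hg' : (if j ≠ i ∧ nxt.getD j (0, 0) = cur.getD i (0, 0) then
            some (ids.getD i "", ids.getD j "", cur.getD j (0, 0), cur.getD i (0, 0),
              ((t : Int) + 1)) else none) = some b := hg
        by_cases hguard : j ≠ i ∧ nxt.getD j (0, 0) = cur.getD i (0, 0)
        case neg => rw [if_neg hguard] at hg'; cases hg'
        case pos =>
          rw [if_pos hguard] at hg'
          have hb : b = pvResI ids cur t i j := by injection hg' with h; exact h.symm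
          obtain ⟨hjlt, hjval⟩ := pvAtGet_some cur _ j hat
          have hjn : j < ids.length := by omega
          rcases Nat.lt_or_ge i j with hij | hij
          · left
            apply pvFindSome?_unique _ j b
            · exact List.mem_range'_1.mpr ⟨by omega, by omega⟩
            · rw [pvGA, if_pos ⟨hguard.2.symm, hjval⟩, hb]
            · intro x hx hxs
              have hxr := List.mem_range'_1.mp hx
              by_cases hcx : cur.getD i (0, 0) = nxt.getD x (0, 0) ∧
                  cur.getD x (0, 0) = nxt.getD i (0, 0)
              · have hxlen : x < cur.length := by omega
                have h1 : cur.getD x (0, 0) = cur.getD j (0, 0) := by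
                  rw [hcx.2, hjval]
                rw [List.getD_eq_getElem _ _ hxlen, List.getD_eq_getElem _ _ hjlt] at h1
                exact (List.Nodup.getElem_inj_iff hc).mp h1
              · rw [pvGA, if_neg hcx] at hxs; simp at hxs
          · have hji : j < i := by
              rcases Nat.lt_or_ge j i with h | h
              · exact h
              · exact absurd (by omega : j = i) hguard.1
            right
            refine ⟨j, hji, ?_⟩
            apply pvFindSome?_isSome _ i
            · exact List.mem_range'_1.mpr ⟨by omega, by omega⟩
            · rw [pvGA, if_pos ⟨hjval, hguard.2.symm⟩]; rfl

-- ===== main proof =====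

-- ===== VERDICT (by name: the statement is the Claim_ definition above) =====
theorem first_conflict_py_spec : Claim_equal_first_conflict_py := by
  intro paths _ hpre
  obtain ⟨hnd, -⟩ := hpre
  show first_conflict_py paths = first_conflict_py_alt paths
  simp only [first_conflict_py, first_conflict_py_alt]
  have hmaps : paths.map (fun pr => pr.2.length) = (paths.map Prod.snd).map List.length := by
    rw [List.map_map]; rfl
  rw [hmaps]
  have hphase1 : (fun t => pvVLoopA paths t (paths.map Prod.fst) [])
      = (fun t => pvVScanB (paths.map Prod.fst) t (pvSnap (paths.map Prod.snd) t) 0 []) := by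
    funext t
    have := pvVLoop_eq_scan paths hnd t paths 0 [] (by simp)
    simpa using this
  rw [hphase1]
  cases hv : (List.range (pvMaxT ((paths.map Prod.snd).map List.length))).findSome?
      (fun t => pvVScanB (paths.map Prod.fst) t (pvSnap (paths.map Prod.snd) t) 0 []) with
  | some r => rfl
  | none =>
      show (List.range (pvMaxT ((paths.map Prod.snd).map List.length) - 1)).findSome?
          (fun t => pvELoopA paths t (paths.map Prod.fst))
        = (List.range (pvMaxT ((paths.map Prod.snd).map List.length) - 1)).findSome?
          (fun t => pvEScanB (paths.map Prod.fst) (pvSnap (paths.map Prod.snd) t)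
            (pvSnap (paths.map Prod.snd) (t + 1)) t)
      apply pvFindSome?_congr
      intro t ht
      have htlt : t < pvMaxT ((paths.map Prod.snd).map List.length) := by
        have := List.mem_range.mp ht; omega
      have hnone : pvVScanB (paths.map Prod.fst) t (pvSnap (paths.map Prod.snd) t) 0 [] = none :=
        List.findSome?_eq_none_iff.mp hv t (List.mem_range.mpr htlt)
      have hcnd : (pvSnap (paths.map Prod.snd) t).Nodup := by
        have := pvVScanB_none_nodup (paths.map Prod.fst) t (pvSnap (paths.map Prod.snd) t) 0 []
          (by simp) hnone
        simpa using this
      have hA := pvELoopA_eq_idx paths hnd t paths.length 0 (by omega)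
      have hlen1 : (pvSnap (paths.map Prod.snd) t).length = (paths.map Prod.fst).length := by
        simp [pvSnap]
      have hlen2 : (pvSnap (paths.map Prod.snd) (t + 1)).length = (paths.map Prod.fst).length := by
        simp [pvSnap]
      have hB := pvEdge_eq (paths.map Prod.fst) (pvSnap (paths.map Prod.snd) t)
        (pvSnap (paths.map Prod.snd) (t + 1)) t hcnd hlen1 hlen2
      have hn : paths.length = (paths.map Prod.fst).length := by simp
      rw [List.drop_zero] at hA
      simp only [Nat.sub_zero] at hA
      rw [← List.range_eq_range'] at hA
      rw [hA]
      rw [← hn] at hB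
      exact hB
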